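-- pv_equiv track=rewrite | github.com/JaViLuMa/Advent-Of-Code-2016 | 9/9.py | ofCourseThereIsMoreDecompressing
-- ===== SOURCE A (Python) =====
-- def ofCourseThereIsMoreDecompressing(string):
--     decompressed = 0
--     index = 0
--
--     while index < len(string):
--         if string[index] == '(':
--             end = string.index(')', index)
--
--             length, times = map(int, string[index + 1:end].split('x'))
--
--             decompressed += ofCourseThereIsMoreDecompressing(string[end + 1:end + 1 + length]) * times
--
--             index = end + 1 + length
--         else:
--             decompressed += 1
--
--             index += 1
--
--     return decompressed
-- ===== SOURCE B (Python) =====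
-- def ofCourseThereIsMoreDecompressing(string):
--     total = 0
--     mult = 1
--     stack = []  # (end position of a marker's range, multiplier in force before it)
--     index = 0
--     while index < len(string):
--         while stack and stack[-1][0] <= index:
--             mult = stack.pop()[1]
--         if string[index] == '(':
--             end = string.index(')', index)
--             length, times = map(int, string[index + 1:end].split('x'))
--             stack.append((end + 1 + length, mult))
--             mult *= times
--             index = end + 1
--         else:
--             total += mult
--             index += 1
--     return total
-- ===== Notes on version B (the rewrite author's own statement) =====
-- stated objective: alternative
-- what changed: A recursively re-parses and re-decompresses each marker's repeated slice; B never recurses or slices: it makes one left-to-right pass keeping a stack of (range-end, saved-multiplier) pairs and a running multiplier, adding the current multiplier for each plain character.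
-- outside the precondition, e.g. on ofCourseThereIsMoreDecompressing('(6x2)(8x3)ab'): A returns 7, B returns 12; on ofCourseThereIsMoreDecompressing('(-1x2)ab'): A returns 3, B returns 2; on ofCourseThereIsMoreDecompressing('( 3 x2)ab'): A returns 4, B returns 4
import Mathlib
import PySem

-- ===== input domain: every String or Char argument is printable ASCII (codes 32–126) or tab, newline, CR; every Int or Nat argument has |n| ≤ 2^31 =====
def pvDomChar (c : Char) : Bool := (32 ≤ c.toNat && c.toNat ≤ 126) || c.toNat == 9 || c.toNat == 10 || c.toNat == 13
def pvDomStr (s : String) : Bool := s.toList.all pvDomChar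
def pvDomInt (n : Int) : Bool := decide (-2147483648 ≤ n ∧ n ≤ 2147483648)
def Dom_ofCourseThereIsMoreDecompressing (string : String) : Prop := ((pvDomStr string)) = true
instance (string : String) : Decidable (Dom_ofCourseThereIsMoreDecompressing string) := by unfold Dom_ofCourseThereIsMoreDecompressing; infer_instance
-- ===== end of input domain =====

-- B replaces A's re-parse-the-slice recursion by one linear scan that keeps a stack of
-- (range end, previous multiplier) for the open markers; equivalence is about the return value only.

-- ===== PORT A =====
-- literal transliteration of A's while loop (acc = decompressed); the recursion on the
-- slice string[end+1:end+1+length] is the nested aGoF call.  fuel is a totality device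
-- only (s.length + s.length^2 steps always suffice, see pv_aGoF_bridge); the `0` branches
-- are exactly where Python raises (ValueError from index/int/unpacking) or where the jump
-- would not advance — all excluded by Pre_.
def aGoF : Nat → List Char → Nat → Int → Int
  | 0, _, _, acc => acc
  | fuel + 1, s, i, acc =>
    if hi : i < s.length then
      if s[i] = '(' then
        -- end = string.index(')', index)
        if PySem.Chars.findFrom s [')'] (i : Int) none < 0 then 0
        else
          -- length, times = map(int, string[index+1:end].split('x'))
          match PySem.Chars.split? (PySem.Chars.slice s (some ((i : Int) + 1)) (some (PySem.Chars.findFrom s [')'] (i : Int) none))) ['x'] with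
          | some [d1, d2] =>
            match PySem.Int.ofChars? d1, PySem.Int.ofChars? d2 with
            | some len, some times =>
              if i < (PySem.Chars.findFrom s [')'] (i : Int) none + 1 + len).toNat then
                aGoF fuel s (PySem.Chars.findFrom s [')'] (i : Int) none + 1 + len).toNat
                  (acc + aGoF fuel (PySem.Chars.slice s (some (PySem.Chars.findFrom s [')'] (i : Int) none + 1)) (some (PySem.Chars.findFrom s [')'] (i : Int) none + 1 + len))) 0 0 * times)
              else 0
            | _, _ => 0
          | _ => 0
      else aGoF fuel s (i + 1) (acc + 1)
    else acc

def ofCourseThereIsMoreDecompressing (string : String) : Int :=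
  aGoF (string.toList.length + string.toList.length * string.toList.length) string.toList 0 0

-- ===== PORT B =====
-- the inner `while stack and stack[-1][0] <= index: mult = stack.pop()[1]` of Source B
def bPop (i : Nat) : List (Int × Int) → Int → List (Int × Int) × Int
  | [], m => ([], m)
  | (b, mv) :: st, m => if b ≤ (i : Int) then bPop i st mv else ((b, mv) :: st, m)

-- literal transliteration of Source B's single loop (total, mult, stack, index); fuel is a
-- totality device only (s.length steps always suffice, see pv_bGoF_bridge)
def bGoF : Nat → List Char → Nat → List (Int × Int) → Int → Int → Int
  | 0, _, _, _, _, total => total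
  | fuel + 1, s, i, stack, mult, total =>
    if hi : i < s.length then
      if s[i] = '(' then
        if PySem.Chars.findFrom s [')'] (i : Int) none < 0 then 0
        else
          match PySem.Chars.split? (PySem.Chars.slice s (some ((i : Int) + 1)) (some (PySem.Chars.findFrom s [')'] (i : Int) none))) ['x'] with
          | some [d1, d2] =>
            match PySem.Int.ofChars? d1, PySem.Int.ofChars? d2 with
            | some len, some times =>
              if i < (PySem.Chars.findFrom s [')'] (i : Int) none + 1).toNat then
                bGoF fuel s (PySem.Chars.findFrom s [')'] (i : Int) none + 1).toNat
                  ((PySem.Chars.findFrom s [')'] (i : Int) none + 1 + len, (bPop i stack mult).2) :: (bPop i stack mult).1)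
                  ((bPop i stack mult).2 * times) total
              else 0
            | _, _ => 0
          | _ => 0
      else bGoF fuel s (i + 1) (bPop i stack mult).1 (bPop i stack mult).2 (total + (bPop i stack mult).2)
    else total

def ofCourseThereIsMoreDecompressing_alt (string : String) : Int :=
  bGoF string.toList.length string.toList 0 [] 1 0

-- ===== PRECONDITION & SPEC =====
-- Pre_ admits exactly the well-formed inputs: every '(' opens a marker "(<digits>x<digits>)"
-- whose repeat range lies inside the region being scanned (recursively).  Excluded are the
-- inputs where A raises ValueError (unclosed or unparsable markers), and the corner forms —
-- signed/spaced numerals, truncated or crossing repeat ranges — that the compressed format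
-- never specifies, where A's re-parsing of the clamped slice and B's weighting of original
-- positions are both defensible choices.  wfGoF is a grammar check on the input text
-- (marker syntax and nesting shape), not a run of either algorithm; its fuel is a
-- totality device (length + 1 always suffices).
-- grammar check: every '(' opens "(<digits>x<digits>)" with its repeat range inside the
-- region (recursively); fuel is a totality device only (length + 1 always suffices)
def wfGoF : Nat → List Char → Bool
  | 0, _ => false
  | fuel + 1, l =>
    match l with
    | [] => true
    | c :: rest =>
      if c = '(' then
        match rest.drop (rest.takeWhile Char.isDigit).length with
        | 'x' :: r2 =>
          match r2.drop (r2.takeWhile Char.isDigit).length with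
          | ')' :: tail =>
            match PySem.Int.ofChars? (rest.takeWhile Char.isDigit), PySem.Int.ofChars? (r2.takeWhile Char.isDigit) with
            | some len, some _ =>
              decide (0 ≤ len) && decide (len.toNat ≤ tail.length) &&
                wfGoF fuel (tail.take len.toNat) && wfGoF fuel (tail.drop len.toNat)
            | _, _ => false
          | _ => false
        | _ => false
      else wfGoF fuel rest

def Pre_ofCourseThereIsMoreDecompressing (string : String) : Prop := wfGoF (string.toList.length + 1) string.toList = true
instance (string : String) : Decidable (Pre_ofCourseThereIsMoreDecompressing string) := by unfold Pre_ofCourseThereIsMoreDecompressing; infer_instance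

def pvWitness_ofCourseThereIsMoreDecompressing : String := "X(2x2)AB(6x3)(1x5)YZ"

def Spec_ofCourseThereIsMoreDecompressing (string : String) (out : Int) : Prop := out = ofCourseThereIsMoreDecompressing_alt string
instance (string : String) (out : Int) : Decidable (Spec_ofCourseThereIsMoreDecompressing string out) := by unfold Spec_ofCourseThereIsMoreDecompressing; infer_instance

-- ===== CLAIM (what is proved, stated in full; the proofs are below) =====
def Claim_equal_ofCourseThereIsMoreDecompressing : Prop := ∀ (string : String), Dom_ofCourseThereIsMoreDecompressing string → Pre_ofCourseThereIsMoreDecompressing string → Spec_ofCourseThereIsMoreDecompressing string (ofCourseThereIsMoreDecompressing string)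

-- ===== LEMMAS AND PROOFS =====

-- proof-side twins of the three ports, by well-founded recursion on positions/lengths
-- (the bridge lemmas pv_*_bridge identify them with the fuelled ports)
def aGo (s : List Char) (i : Nat) (acc : Int) : Int :=
  if hi : i < s.length then
    if s[i] = '(' then
      -- end = string.index(')', index)
      if he : PySem.Chars.findFrom s [')'] (i : Int) none < 0 then 0
      else
        -- length, times = map(int, string[index+1:end].split('x'))
        match PySem.Chars.split? (PySem.Chars.slice s (some ((i : Int) + 1)) (some (PySem.Chars.findFrom s [')'] (i : Int) none))) ['x'] with
        | some [d1, d2] =>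
          match PySem.Int.ofChars? d1, PySem.Int.ofChars? d2 with
          | some len, some times =>
            if hj : i < (PySem.Chars.findFrom s [')'] (i : Int) none + 1 + len).toNat then
              aGo s (PySem.Chars.findFrom s [')'] (i : Int) none + 1 + len).toNat
                (acc + aGo (PySem.Chars.slice s (some (PySem.Chars.findFrom s [')'] (i : Int) none + 1)) (some (PySem.Chars.findFrom s [')'] (i : Int) none + 1 + len))) 0 0 * times)
            else 0
          | _, _ => 0
        | _ => 0
    else aGo s (i + 1) (acc + 1)
  else acc
termination_by (s.length, s.length - i)
decreasing_by
  · left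
    have h1 := PySem.List.length_slice s (PySem.Chars.findFrom s [')'] (i : Int) none + 1) (PySem.Chars.findFrom s [')'] (i : Int) none + 1 + len)
    have h2 := PySem.List.clampIdx_le s.length (PySem.Chars.findFrom s [')'] (i : Int) none + 1 + len)
    have h3 : PySem.List.clampIdx s.length (PySem.Chars.findFrom s [')'] (i : Int) none + 1) = min ((PySem.Chars.findFrom s [')'] (i : Int) none).toNat + 1) s.length := by
      have : PySem.Chars.findFrom s [')'] (i : Int) none + 1 = (((PySem.Chars.findFrom s [')'] (i : Int) none).toNat + 1 : Nat) : Int) := by omega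
      rw [this, PySem.List.clampIdx_natCast]
    simp only [PySem.Chars.slice] at *
    omega
  · right; omega
  · right; omega


def bGo (s : List Char) (i : Nat) (stack : List (Int × Int)) (mult total : Int) : Int :=
  if hi : i < s.length then
    if s[i] = '(' then
      if he : PySem.Chars.findFrom s [')'] (i : Int) none < 0 then 0
      else
        match PySem.Chars.split? (PySem.Chars.slice s (some ((i : Int) + 1)) (some (PySem.Chars.findFrom s [')'] (i : Int) none))) ['x'] with
        | some [d1, d2] =>
          match PySem.Int.ofChars? d1, PySem.Int.ofChars? d2 with
          | some len, some times =>
            if hj : i < (PySem.Chars.findFrom s [')'] (i : Int) none + 1).toNat then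
              bGo s (PySem.Chars.findFrom s [')'] (i : Int) none + 1).toNat
                ((PySem.Chars.findFrom s [')'] (i : Int) none + 1 + len, (bPop i stack mult).2) :: (bPop i stack mult).1)
                ((bPop i stack mult).2 * times) total
            else 0
          | _, _ => 0
        | _ => 0
    else bGo s (i + 1) (bPop i stack mult).1 (bPop i stack mult).2 (total + (bPop i stack mult).2)
  else total
termination_by s.length - i
decreasing_by
  · omega
  · omega


def wfGo : List Char → Bool
  | [] => true
  | c :: rest =>
    if c = '(' then
      match h1 : rest.drop (rest.takeWhile Char.isDigit).length with
      | 'x' :: r2 =>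
        match h2 : r2.drop (r2.takeWhile Char.isDigit).length with
        | ')' :: tail =>
          match PySem.Int.ofChars? (rest.takeWhile Char.isDigit), PySem.Int.ofChars? (r2.takeWhile Char.isDigit) with
          | some len, some _ =>
            decide (0 ≤ len) && decide (len.toNat ≤ tail.length) &&
              wfGo (tail.take len.toNat) && wfGo (tail.drop len.toNat)
          | _, _ => false
        | _ => false
      | _ => false
    else wfGo rest
termination_by s => s.length
decreasing_by
  · have e1 : rest.length - (rest.takeWhile Char.isDigit).length = r2.length + 1 := by
      have := congrArg List.length h1; simpa using this
    have e2 : r2.length - (r2.takeWhile Char.isDigit).length = tail.length + 1 := by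
      have := congrArg List.length h2; simpa using this
    have := List.length_take_le len.toNat tail
    simp; omega
  · have e1 : rest.length - (rest.takeWhile Char.isDigit).length = r2.length + 1 := by
      have := congrArg List.length h1; simpa using this
    have e2 : r2.length - (r2.takeWhile Char.isDigit).length = tail.length + 1 := by
      have := congrArg List.length h2; simpa using this
    simp; omega
  · simp


-- loop exit: past the end both loops return their accumulator
theorem pv_aGo_term (s : List Char) (i : Nat) (acc : Int) (h : s.length ≤ i) : aGo s i acc = acc := by
  rw [aGo.eq_def, dif_neg (by omega)]

theorem pv_bGo_term (s : List Char) (i : Nat) (stack : List (Int × Int)) (mult total : Int)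
    (h : s.length ≤ i) : bGo s i stack mult total = total := by
  rw [bGo.eq_def, dif_neg (by omega)]

theorem pv_wfGoF_bridge : ∀ (n : Nat) (l : List Char), l.length ≤ n → ∀ (fuel : Nat),
    l.length < fuel → wfGoF fuel l = true → wfGo l = true := by
  intro n
  induction n with
  | zero =>
    intro l hl fuel hf h
    have h0 : l = [] := List.length_eq_zero_iff.mp (by omega)
    subst h0
    rw [wfGo.eq_def]
  | succ m ih =>
    intro l hl fuel hf h
    cases l with
    | nil => rw [wfGo.eq_def]
    | cons c rest =>
      cases fuel with
      | zero => omega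
      | succ f =>
        by_cases hc : c = '('
        · subst hc
          simp only [wfGoF, reduceIte] at h
          split at h <;> try exact absurd h Bool.false_ne_true
          rename_i r2 heq1
          split at h <;> try exact absurd h Bool.false_ne_true
          rename_i tl heq2
          split at h <;> try exact absurd h Bool.false_ne_true
          rename_i lenv tmv heqL heqT
          simp only [Bool.and_eq_true, decide_eq_true_eq] at h
          have e1 : rest.length - (rest.takeWhile Char.isDigit).length = r2.length + 1 := by
            have := congrArg List.length heq1; simpa using this
          have e2 : r2.length - (r2.takeWhile Char.isDigit).length = tl.length + 1 := by
            have := congrArg List.length heq2; simpa using this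
          have htl : tl.length + 2 ≤ rest.length := by omega
          have hlm : rest.length ≤ m := by simpa using hl
          have hfm : rest.length < f := by simpa using hf
          have hwt : wfGo (tl.take lenv.toNat) = true :=
            ih _ (by simp [List.length_take]; omega) f (by simp [List.length_take]; omega) h.1.2
          have hwd : wfGo (tl.drop lenv.toNat) = true :=
            ih _ (by simp [List.length_drop]; omega) f (by simp [List.length_drop]; omega) h.2
          rw [wfGo.eq_def]
          simp only [reduceIte]
          split
          · rename_i r2' heq1'
            rw [heq1] at heq1'
            obtain rfl : r2 = r2' := by simpa using heq1'
            split
            · rename_i tl' heq2'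
              rw [heq2] at heq2'
              obtain rfl : tl = tl' := by simpa using heq2'
              simp only [heqL, heqT, Bool.and_eq_true, decide_eq_true_eq]
              exact ⟨⟨⟨h.1.1.1, h.1.1.2⟩, hwt⟩, hwd⟩
            · rename_i hcon
              exact absurd heq2 (hcon tl)
          · rename_i hcon
            exact absurd heq1 (hcon r2)
        · simp only [wfGoF, if_neg hc] at h
          rw [wfGo.eq_def]
          simp only [if_neg hc]
          exact ih rest (by simp at hl ⊢; omega) f (by simp at hf ⊢; omega) h

theorem pv_slice_len_lt (s : List Char) (e len : Int) (hi : 0 < s.length) (he : 0 ≤ e) :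
    (PySem.Chars.slice s (some (e + 1)) (some (e + 1 + len))).length < s.length := by
  have h1 := PySem.List.length_slice s (e + 1) (e + 1 + len)
  have h2 := PySem.List.clampIdx_le s.length (e + 1 + len)
  have h3 : PySem.List.clampIdx s.length (e + 1) = min (e.toNat + 1) s.length := by
    rw [show e + 1 = ((e.toNat + 1 : Nat) : Int) from by omega, PySem.List.clampIdx_natCast]
  simp only [PySem.Chars.slice] at *
  omega

theorem pv_aGoF_bridge : ∀ (fuel : Nat) (s : List Char) (i : Nat) (acc : Int),
    s.length - i + s.length * s.length ≤ fuel → aGoF fuel s i acc = aGo s i acc := by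
  intro fuel
  induction fuel with
  | zero =>
    intro s i acc h
    have h0 : s = [] := by
      rcases Nat.eq_zero_or_pos s.length with hz | hp
      · exact List.length_eq_zero_iff.mp hz
      · exact absurd h (by have := Nat.mul_pos hp hp; omega)
    subst h0
    rw [pv_aGo_term _ _ _ (by simp)]
    rfl
  | succ f ih =>
    intro s i acc h
    rw [aGo.eq_def]
    simp only [aGoF]
    by_cases hi : i < s.length
    · simp only [dif_pos hi]
      by_cases hg : s[i] = '('
      · simp only [if_pos hg]
        by_cases hf : PySem.Chars.findFrom s [')'] (i : Int) none < 0
        · simp only [if_pos hf, dif_pos hf]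
        · simp only [if_neg hf, dif_neg hf]
          rcases hsp : PySem.Chars.split? (PySem.Chars.slice s (some ((i : Int) + 1))
              (some (PySem.Chars.findFrom s [')'] (i : Int) none))) ['x'] with _ | l
          · simp only [hsp]
          · rcases l with _ | ⟨d1, l⟩
            · simp only [hsp]
            rcases l with _ | ⟨d2, l⟩
            · simp only [hsp]
            rcases l with _ | ⟨d3, l⟩
            · simp only [hsp]
              rcases hL : PySem.Int.ofChars? d1 with _ | len
              · simp only [hL]
              rcases hT : PySem.Int.ofChars? d2 with _ | times
              · simp only [hL, hT]
              simp only [hL, hT]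
              by_cases hj : i < (PySem.Chars.findFrom s [')'] (i : Int) none + 1 + len).toNat
              · simp only [if_pos hj, dif_pos hj]
                have hsl : (PySem.Chars.slice s
                    (some (PySem.Chars.findFrom s [')'] (i : Int) none + 1))
                    (some (PySem.Chars.findFrom s [')'] (i : Int) none + 1 + len))).length
                    < s.length :=
                  pv_slice_len_lt s _ len (by omega) (by omega)
                set q := (PySem.Chars.slice s
                    (some (PySem.Chars.findFrom s [')'] (i : Int) none + 1))
                    (some (PySem.Chars.findFrom s [')'] (i : Int) none + 1 + len))).length with hq
                have hb1 : q - 0 + q * q ≤ f := by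
                  have h2 : (q + 1) * (q + 1) ≤ s.length * s.length := Nat.mul_le_mul hsl hsl
                  have h3 : (q + 1) * (q + 1) = q * q + 2 * q + 1 := by ring
                  omega
                rw [ih _ 0 0 hb1]
                rw [ih s _ _ (by omega)]
              · simp only [if_neg hj, dif_neg hj]
            · simp only [hsp]
      · simp only [if_neg hg]
        exact ih s (i + 1) (acc + 1) (by omega)
    · simp only [dif_neg hi]

theorem pv_bGoF_bridge : ∀ (fuel : Nat) (s : List Char) (i : Nat) (stack : List (Int × Int))
    (mult total : Int), s.length - i ≤ fuel →
    bGoF fuel s i stack mult total = bGo s i stack mult total := by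
  intro fuel
  induction fuel with
  | zero =>
    intro s i stack mult total h
    rw [pv_bGo_term _ _ _ _ _ (by omega)]
    rfl
  | succ f ih =>
    intro s i stack mult total h
    rw [bGo.eq_def]
    simp only [bGoF]
    by_cases hi : i < s.length
    · simp only [dif_pos hi]
      by_cases hg : s[i] = '('
      · simp only [if_pos hg]
        by_cases hf : PySem.Chars.findFrom s [')'] (i : Int) none < 0
        · simp only [if_pos hf, dif_pos hf]
        · simp only [if_neg hf, dif_neg hf]
          rcases hsp : PySem.Chars.split? (PySem.Chars.slice s (some ((i : Int) + 1))
              (some (PySem.Chars.findFrom s [')'] (i : Int) none))) ['x'] with _ | l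
          · simp only [hsp]
          · rcases l with _ | ⟨d1, l⟩
            · simp only [hsp]
            rcases l with _ | ⟨d2, l⟩
            · simp only [hsp]
            rcases l with _ | ⟨d3, l⟩
            · simp only [hsp]
              rcases hL : PySem.Int.ofChars? d1 with _ | len
              · simp only [hL]
              rcases hT : PySem.Int.ofChars? d2 with _ | times
              · simp only [hL, hT]
              simp only [hL, hT]
              by_cases hj : i < (PySem.Chars.findFrom s [')'] (i : Int) none + 1).toNat
              · simp only [if_pos hj, dif_pos hj]
                rw [ih s _ _ _ _ (by omega)]
              · simp only [if_neg hj, dif_neg hj]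
            · simp only [hsp]
      · simp only [if_neg hg]
        exact ih s (i + 1) _ _ _ (by omega)
    · simp only [dif_neg hi]



theorem pv_dropWhile_eq (p : Char → Bool) (l : List Char) :
    l.dropWhile p = l.drop (l.takeWhile p).length := by
  induction l with
  | nil => simp
  | cons c t ih => by_cases h : p c <;> simp [h, ih]

theorem pv_getElem_drop' (s : List Char) (i : Nat) (hi : i < s.length) (c : Char) (t : List Char)
    (h : s.drop i = c :: t) : s[i] = c := by
  have h1 : (s.drop i)[0]'(by simp [h]) = s[i + 0]'(by omega) := List.getElem_drop
  simp only [h] at h1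
  simpa using h1.symm

theorem pv_drop_add (s : List Char) (m n : Nat) : (s.drop m).drop n = s.drop (m + n) := by
  rw [List.drop_drop]

theorem pv_not_mem_digits (d : List Char) (hd : ∀ c ∈ d, c.isDigit) (c : Char)
    (hc : c.isDigit = false) : c ∉ d := fun hm => by have := hd c hm; rw [hc] at this; exact Bool.false_ne_true this

theorem pv_find_singleton (u v : List Char) (c : Char) (hc : c ∉ u) :
    PySem.Chars.find (u ++ c :: v) [c] = u.length := by
  have hinf : [c] <:+: (u ++ c :: v) := ⟨u, v, by simp⟩
  have hne := (PySem.Chars.find_ne_neg_one_iff (u ++ c :: v) [c]).2 hinf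
  have hm1 := PySem.Chars.neg_one_le_find (u ++ c :: v) [c]
  have hge : 0 ≤ PySem.Chars.find (u ++ c :: v) [c] := by omega
  obtain ⟨hpre, hmin⟩ := PySem.Chars.find_spec hge
  have hle : (PySem.Chars.find (u ++ c :: v) [c]).toNat ≤ u.length := by
    by_contra hgt
    exact hmin u.length (by omega) ⟨v, by simp [List.drop_left]⟩
  have heq : (PySem.Chars.find (u ++ c :: v) [c]).toNat = u.length := by
    rcases Nat.lt_or_ge (PySem.Chars.find (u ++ c :: v) [c]).toNat u.length with hlt | hge2
    · exfalso
      obtain ⟨t2, ht⟩ := hpre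
      have hcc : (u ++ c :: v)[(PySem.Chars.find (u ++ c :: v) [c]).toNat]'(by simp; omega) = c :=
        pv_getElem_drop' _ _ (by simp; omega) _ _ ht.symm
      rw [List.getElem_append_left hlt] at hcc
      exact hc (hcc ▸ List.getElem_mem _)
    · omega
  omega

theorem pv_splitGo_no (x : Char) : ∀ (l : List Char) (fuel : Nat) (cur : List Char)
    (acc : List (List Char)), x ∉ l → l.length ≤ fuel →
      PySem.Chars.splitOn.go [x] fuel l cur acc = ((cur.reverse ++ l) :: acc).reverse := by
  intro l
  induction l with
  | nil => intro fuel cur acc _ _; cases fuel <;> simp [PySem.Chars.splitOn.go]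
  | cons a t ih =>
    intro fuel cur acc h hf
    cases fuel with
    | zero => simp at hf
    | succ f =>
      have hxa : ([x].isPrefixOf (a :: t)) = false := by
        simp only [List.isPrefixOf, Bool.and_eq_false_iff, beq_eq_false_iff_ne]
        left; exact fun h' => h (by subst h'; simp)
      rw [PySem.Chars.splitOn.go.eq_def]
      simp only [hxa, Bool.false_eq_true, if_false]
      rw [ih f (a :: cur) acc (fun hm => h (by simp [hm])) (by simp at hf ⊢; omega)]
      simp

theorem pv_splitGo_mid (d2 : List Char) (h2 : 'x' ∉ d2) : ∀ (d1 : List Char)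
    (fuel : Nat) (cur : List Char) (acc : List (List Char)), 'x' ∉ d1 →
      d1.length + d2.length + 1 ≤ fuel →
      PySem.Chars.splitOn.go ['x'] fuel (d1 ++ 'x' :: d2) cur acc
        = (d2 :: (cur.reverse ++ d1) :: acc).reverse := by
  intro d1
  induction d1 with
  | nil =>
    intro fuel cur acc _ hf
    cases fuel with
    | zero => simp at hf
    | succ f =>
      have hpref : (['x'].isPrefixOf ('x' :: d2)) = true := by
        simp [List.isPrefixOf]
      rw [PySem.Chars.splitOn.go.eq_def]
      simp only [List.nil_append, hpref, if_true]
      rw [show List.drop ['x'].length ('x' :: d2) = d2 from by simp]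
      rw [pv_splitGo_no 'x' d2 f [] (cur.reverse :: acc) h2 (by simp at hf ⊢; omega)]
      simp
  | cons a t ih =>
    intro fuel cur acc h1 hf
    cases fuel with
    | zero => simp at hf
    | succ f =>
      have hxa : (['x'].isPrefixOf (a :: (t ++ 'x' :: d2))) = false := by
        simp only [List.isPrefixOf, Bool.and_eq_false_iff, beq_eq_false_iff_ne]
        left; exact fun h' => h1 (by subst h'; simp)
      rw [PySem.Chars.splitOn.go.eq_def]
      simp only [List.cons_append, hxa, Bool.false_eq_true, if_false]
      rw [ih f (a :: cur) acc (fun hm => h1 (by simp [hm])) (by simp at hf ⊢; omega)]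
      simp

theorem pv_split_digits (d1 d2 : List Char) (h1 : 'x' ∉ d1) (h2 : 'x' ∉ d2) :
    PySem.Chars.split? (d1 ++ 'x' :: d2) ['x'] = some [d1, d2] := by
  simp only [PySem.Chars.split?, PySem.Chars.splitOn, List.isEmpty_cons, Bool.false_eq_true,
    if_false, Option.some.injEq]
  rw [pv_splitGo_mid d2 h2 d1 _ [] [] h1 (by simp)]
  simp

-- the pieces of one marker "(d1 x d2 )" sitting at position i of s
theorem pv_findFrom_marker (s : List Char) (i : Nat) (d1 d2 tail r : List Char)
    (hd : s.drop i = '(' :: (d1 ++ 'x' :: d2 ++ ')' :: (tail ++ r)))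
    (h1 : ∀ c ∈ d1, c.isDigit) (h2 : ∀ c ∈ d2, c.isDigit) :
    PySem.Chars.findFrom s [')'] (i : Int) none = ((i + d1.length + d2.length + 2 : Nat) : Int) := by
  have hi : i < s.length := by
    by_contra hx
    rw [List.drop_eq_nil_of_le (by omega)] at hd
    simp at hd
  have hmem : ')' ∉ '(' :: (d1 ++ 'x' :: d2) := by
    simp only [List.mem_cons, List.mem_append]
    push_neg
    exact ⟨by decide, pv_not_mem_digits d1 h1 ')' (by decide),
           by decide, pv_not_mem_digits d2 h2 ')' (by decide)⟩
  have hfind : PySem.Chars.find (s.drop i) [')'] = (((d1.length + d2.length + 2 : Nat)) : Int) := by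
    rw [hd]
    have hsh : '(' :: (d1 ++ 'x' :: d2 ++ ')' :: (tail ++ r))
        = ('(' :: (d1 ++ 'x' :: d2)) ++ ')' :: (tail ++ r) := by simp
    rw [hsh, pv_find_singleton _ _ _ hmem]
    simp; push_cast; ring
  rw [PySem.Chars.findFrom_natCast s [')'] i (by omega), hfind]
  rw [if_neg (by omega)]
  push_cast; ring

theorem pv_slice_content (s : List Char) (i : Nat) (d1 d2 tail r : List Char)
    (hd : s.drop i = '(' :: (d1 ++ 'x' :: d2 ++ ')' :: (tail ++ r))) :
    PySem.Chars.slice s (some ((i : Int) + 1)) (some ((i + d1.length + d2.length + 2 : Nat) : Int))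
      = d1 ++ 'x' :: d2 := by
  have hc1 : ((i : Int) + 1) = ((i + 1 : Nat) : Int) := by push_cast; ring
  have hc2 : ((i + d1.length + d2.length + 2 : Nat) : Int)
      = ((i + 1 : Nat) : Int) + ((d1.length + d2.length + 1 : Nat) : Int) := by push_cast; ring
  rw [PySem.Chars.slice, hc1, hc2, PySem.List.slice_natCast_add]
  have hdrop : s.drop (i + 1) = (d1 ++ 'x' :: d2) ++ ')' :: (tail ++ r) := by
    rw [← pv_drop_add s i 1, hd]; simp
  rw [hdrop, List.take_left' (by simp; omega)]

theorem pv_drop_region (s : List Char) (i : Nat) (d1 d2 tail r : List Char) (k : Nat)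
    (hd : s.drop i = '(' :: (d1 ++ 'x' :: d2 ++ ')' :: (tail ++ r)))
    (hk : k ≤ tail.length) :
    s.drop (i + (d1.length + d2.length + 3) + k) = tail.drop k ++ r := by
  have h3 : s.drop (i + (d1.length + d2.length + 3) + k)
      = (s.drop i).drop ((d1.length + d2.length + 3) + k) := by
    rw [pv_drop_add]; ring_nf
  rw [h3, hd]
  have hsh : '(' :: (d1 ++ 'x' :: d2 ++ ')' :: (tail ++ r))
      = ('(' :: (d1 ++ 'x' :: d2 ++ [')'])) ++ (tail ++ r) := by simp
  rw [hsh, ← pv_drop_add _ (d1.length + d2.length + 3) k,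
    List.drop_left' (by simp; omega)]
  rw [List.drop_append_of_le_length hk]

theorem pv_slice_sub (s : List Char) (i : Nat) (d1 d2 tail r : List Char) (len : Int)
    (hd : s.drop i = '(' :: (d1 ++ 'x' :: d2 ++ ')' :: (tail ++ r)))
    (h0 : 0 ≤ len) (hlen : len.toNat ≤ tail.length) :
    PySem.Chars.slice s (some (((i + d1.length + d2.length + 2 : Nat) : Int) + 1))
        (some (((i + d1.length + d2.length + 2 : Nat) : Int) + 1 + len))
      = tail.take len.toNat := by
  have hc1 : (((i + d1.length + d2.length + 2 : Nat) : Int) + 1)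
      = ((i + d1.length + d2.length + 3 : Nat) : Int) := by push_cast; ring
  have hc2 : (((i + d1.length + d2.length + 2 : Nat) : Int) + 1 + len)
      = ((i + d1.length + d2.length + 3 : Nat) : Int) + ((len.toNat : Nat) : Int) := by omega
  rw [PySem.Chars.slice, hc2, hc1, PySem.List.slice_natCast_add]
  have hdrop := pv_drop_region s i d1 d2 tail r 0 hd (by omega)
  simp only [Nat.add_zero, List.drop_zero] at hdrop
  have hdrop2 : s.drop (i + d1.length + d2.length + 3) = tail ++ r := by
    rw [show i + d1.length + d2.length + 3 = i + (d1.length + d2.length + 3) from by ring]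
    exact hdrop
  rw [hdrop2, List.take_append_of_le_length hlen]

theorem pv_aGo_nil (i : Nat) (acc : Int) : aGo [] i acc = acc := by
  rw [aGo.eq_def]; simp

theorem pv_takeWhile_split (p : Char → Bool) (l : List Char) :
    l = l.takeWhile p ++ l.drop (l.takeWhile p).length := by
  conv_lhs => rw [← List.takeWhile_append_dropWhile (p := p) (l := l)]
  rw [pv_dropWhile_eq]

theorem pv_aGo_lit (s : List Char) (i : Nat) (acc : Int) (hi : i < s.length)
    (hc : ¬ s[i] = '(') : aGo s i acc = aGo s (i + 1) (acc + 1) := by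
  rw [aGo.eq_def, dif_pos hi, if_neg hc]

theorem pv_aGo_step (s : List Char) (i : Nat) (d1 d2 tail r : List Char) (len times acc : Int)
    (hd : s.drop i = '(' :: (d1 ++ 'x' :: d2 ++ ')' :: (tail ++ r)))
    (h1 : ∀ c ∈ d1, c.isDigit) (h2 : ∀ c ∈ d2, c.isDigit)
    (hL : PySem.Int.ofChars? d1 = some len) (hT : PySem.Int.ofChars? d2 = some times)
    (h0 : 0 ≤ len) (hlen : len.toNat ≤ tail.length) :
    aGo s i acc = aGo s (i + d1.length + d2.length + 3 + len.toNat)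
      (acc + aGo (tail.take len.toNat) 0 0 * times) := by
  have hi : i < s.length := by
    by_contra hx
    rw [List.drop_eq_nil_of_le (by omega)] at hd
    simp at hd
  have hgi : s[i] = '(' := pv_getElem_drop' s i hi _ _ hd
  have hfind := pv_findFrom_marker s i d1 d2 tail r hd h1 h2
  have hx1 : 'x' ∉ d1 := pv_not_mem_digits d1 h1 'x' (by decide)
  have hx2 : 'x' ∉ d2 := pv_not_mem_digits d2 h2 'x' (by decide)
  conv_lhs => rw [aGo.eq_def]
  rw [dif_pos hi, if_pos hgi, hfind, dif_neg (by omega)]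
  rw [pv_slice_content s i d1 d2 tail r hd, pv_split_digits d1 d2 hx1 hx2]
  simp only [hL, hT]
  rw [pv_slice_sub s i d1 d2 tail r len hd h0 hlen]
  rw [show (((i + d1.length + d2.length + 2 : Nat) : Int) + 1 + len).toNat
      = i + d1.length + d2.length + 3 + len.toNat from by omega]
  rw [dif_pos (by omega)]

theorem pv_wf_lit (c : Char) (rest : List Char) (hc : ¬ c = '(') :
    wfGo (c :: rest) = wfGo rest := by
  rw [wfGo.eq_def]; simp [hc]

theorem pv_wf_marker (rest : List Char) (h : wfGo ('(' :: rest) = true) :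
    ∃ d1 d2 tail len times,
      rest = d1 ++ 'x' :: d2 ++ ')' :: tail ∧
      (∀ c ∈ d1, c.isDigit) ∧ (∀ c ∈ d2, c.isDigit) ∧
      PySem.Int.ofChars? d1 = some len ∧ PySem.Int.ofChars? d2 = some times ∧
      0 ≤ len ∧ len.toNat ≤ tail.length ∧
      wfGo (tail.take len.toNat) = true ∧ wfGo (tail.drop len.toNat) = true := by
  rw [wfGo.eq_def] at h
  simp only [reduceIte] at h
  split at h <;> try exact absurd h Bool.false_ne_true
  rename_i r2 heq1
  split at h <;> try exact absurd h Bool.false_ne_true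
  rename_i tl heq2
  split at h <;> try exact absurd h Bool.false_ne_true
  rename_i lenv tmv heqL heqT
  simp only [Bool.and_eq_true, decide_eq_true_eq] at h
  refine ⟨rest.takeWhile Char.isDigit, r2.takeWhile Char.isDigit, tl, lenv, tmv,
    ?_, ?_, ?_, heqL, heqT, h.1.1.1, h.1.1.2, h.1.2, h.2⟩
  · have hr2 : r2 = (r2.takeWhile Char.isDigit) ++ ')' :: tl := by
      conv_lhs => rw [pv_takeWhile_split Char.isDigit r2, heq2]
    conv_lhs => rw [pv_takeWhile_split Char.isDigit rest, heq1, hr2]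
    simp
  · intro c hc; exact List.mem_takeWhile_imp hc
  · intro c hc; exact List.mem_takeWhile_imp hc

-- region decomposition for A's loop: scanning a well-formed region adds its own A-value
theorem pv_la2 : ∀ (n : Nat) (t : List Char), t.length ≤ n → wfGo t = true →
    ∀ (s : List Char) (i : Nat) (acc : Int) (r : List Char), s.drop i = t ++ r →
      aGo s i acc = aGo s (i + t.length) (acc + aGo t 0 0) := by
  intro n
  induction n with
  | zero =>
    intro t ht _ s i acc r _
    have h0 : t = [] := List.length_eq_zero_iff.mp (by omega)
    subst h0
    simp [pv_aGo_nil]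
  | succ m ih =>
    intro t ht hwf s i acc r hd
    cases t with
    | nil => simp [pv_aGo_nil]
    | cons c rest =>
      by_cases hc : c = '('
      · subst hc
        obtain ⟨d1, d2, tail, len, times, hrest, h1, h2, hL, hT, h0, hlen, hwt, hwd⟩ :=
          pv_wf_marker rest hwf
        subst hrest
        have hd' : s.drop i = '(' :: (d1 ++ 'x' :: d2 ++ ')' :: (tail ++ r)) := by
          rw [hd]; simp
        rw [pv_aGo_step s i d1 d2 tail r len times acc hd' h1 h2 hL hT h0 hlen]
        have hlen_d : (tail.drop len.toNat).length ≤ m := by simp at ht ⊢; omega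
        have hdrop : s.drop (i + d1.length + d2.length + 3 + len.toNat)
            = tail.drop len.toNat ++ r := by
          rw [show i + d1.length + d2.length + 3 + len.toNat
              = i + (d1.length + d2.length + 3) + len.toNat from by ring]
          exact pv_drop_region s i d1 d2 tail r len.toNat hd' hlen
        rw [ih (tail.drop len.toNat) hlen_d hwd s _ _ r hdrop]
        have hval : aGo ('(' :: (d1 ++ 'x' :: d2 ++ ')' :: tail)) 0 0
            = aGo (tail.take len.toNat) 0 0 * times + aGo (tail.drop len.toNat) 0 0 := by
          have hd0 : (('(' :: (d1 ++ 'x' :: d2 ++ ')' :: tail)) : List Char).drop 0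
              = '(' :: (d1 ++ 'x' :: d2 ++ ')' :: (tail ++ [])) := by simp
          rw [pv_aGo_step _ 0 d1 d2 tail [] len times 0 hd0 h1 h2 hL hT h0 hlen]
          have hdrop0 : (('(' :: (d1 ++ 'x' :: d2 ++ ')' :: tail)) : List Char).drop
              (0 + d1.length + d2.length + 3 + len.toNat) = tail.drop len.toNat ++ [] := by
            rw [show 0 + d1.length + d2.length + 3 + len.toNat
                = 0 + (d1.length + d2.length + 3) + len.toNat from by ring]
            exact pv_drop_region _ 0 d1 d2 tail [] len.toNat hd0 hlen
          rw [ih (tail.drop len.toNat) hlen_d hwd _ _ _ [] hdrop0]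
          rw [pv_aGo_term _ _ _ (by simp; omega)]
          ring
        rw [hval]
        congr 1
        · simp; omega
        · ring
      · have hne : s.drop i = c :: (rest ++ r) := by rw [hd]; simp
        have hi : i < s.length := by
          by_contra hx
          rw [List.drop_eq_nil_of_le (by omega)] at hne
          simp at hne
        have hgi : s[i] = c := pv_getElem_drop' s i hi _ _ hne
        have hwr : wfGo rest = true := by rw [← pv_wf_lit c rest hc]; exact hwf
        rw [pv_aGo_lit s i acc hi (by rw [hgi]; exact hc)]
        rw [ih rest (by simp at ht; omega) hwr s (i + 1) (acc + 1) r
          (by rw [← pv_drop_add s i 1, hne]; simp)]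
        have hvl : aGo (c :: rest) 0 0 = 1 + aGo rest 0 0 := by
          rw [pv_aGo_lit (c :: rest) 0 0 (by simp) (by simpa using hc)]
          simp only [Nat.zero_add, zero_add]
          rw [ih rest (by simp at ht; omega) hwr (c :: rest) 1 1 [] (by simp)]
          rw [pv_aGo_term _ _ _ (by simp)]
        rw [hvl]
        congr 1
        · simp; omega
        · ring

theorem pv_aVal_lit (c : Char) (rest : List Char) (hc : ¬ c = '(')
    (hwf : wfGo rest = true) : aGo (c :: rest) 0 0 = 1 + aGo rest 0 0 := by
  rw [pv_aGo_lit (c :: rest) 0 0 (by simp) (by simpa using hc)]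
  simp only [Nat.zero_add, zero_add]
  rw [pv_la2 rest.length rest Nat.le.refl hwf (c :: rest) 1 1 [] (by simp)]
  rw [pv_aGo_term _ _ _ (by simp)]

theorem pv_aVal_marker (d1 d2 tail : List Char) (len times : Int)
    (h1 : ∀ c ∈ d1, c.isDigit) (h2 : ∀ c ∈ d2, c.isDigit)
    (hL : PySem.Int.ofChars? d1 = some len) (hT : PySem.Int.ofChars? d2 = some times)
    (h0 : 0 ≤ len) (hlen : len.toNat ≤ tail.length)
    (hwfd : wfGo (tail.drop len.toNat) = true) :
    aGo ('(' :: (d1 ++ 'x' :: d2 ++ ')' :: tail)) 0 0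
      = aGo (tail.take len.toNat) 0 0 * times + aGo (tail.drop len.toNat) 0 0 := by
  have hd0 : (('(' :: (d1 ++ 'x' :: d2 ++ ')' :: tail)) : List Char).drop 0
      = '(' :: (d1 ++ 'x' :: d2 ++ ')' :: (tail ++ [])) := by simp
  rw [pv_aGo_step _ 0 d1 d2 tail [] len times 0 hd0 h1 h2 hL hT h0 hlen]
  have hdrop0 : (('(' :: (d1 ++ 'x' :: d2 ++ ')' :: tail)) : List Char).drop
      (0 + d1.length + d2.length + 3 + len.toNat) = tail.drop len.toNat ++ [] := by
    rw [show 0 + d1.length + d2.length + 3 + len.toNat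
        = 0 + (d1.length + d2.length + 3) + len.toNat from by ring]
    exact pv_drop_region _ 0 d1 d2 tail [] len.toNat hd0 hlen
  rw [pv_la2 (tail.drop len.toNat).length _ Nat.le.refl hwfd _ _ _ [] hdrop0]
  rw [pv_aGo_term _ _ _ (by simp; omega)]
  ring

theorem pv_bPop_noop (i : Nat) (stack : List (Int × Int)) (mult : Int)
    (h : ∀ p ∈ stack, (i : Int) < p.1) : bPop i stack mult = (stack, mult) := by
  cases stack with
  | nil => rfl
  | cons p st =>
    obtain ⟨b, mv⟩ := p
    have := h (b, mv) (by simp)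
    simp only [bPop]
    rw [if_neg (by simpa using by omega)]

theorem pv_bGo_pop (s : List Char) (i : Nat) (b mv m total : Int) (stack : List (Int × Int))
    (h : b ≤ (i : Int)) : bGo s i ((b, mv) :: stack) m total = bGo s i stack mv total := by
  conv_lhs => rw [bGo.eq_def]
  conv_rhs => rw [bGo.eq_def]
  have hp : bPop i ((b, mv) :: stack) m = bPop i stack mv := by simp [bPop, h]
  rw [hp]

theorem pv_bGo_lit (s : List Char) (i : Nat) (stack : List (Int × Int)) (mult total : Int)
    (hi : i < s.length) (hc : ¬ s[i] = '(') (h : ∀ p ∈ stack, (i : Int) < p.1) :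
    bGo s i stack mult total = bGo s (i + 1) stack mult (total + mult) := by
  rw [bGo.eq_def, dif_pos hi, if_neg hc, pv_bPop_noop i stack mult h]

theorem pv_bGo_step (s : List Char) (i : Nat) (d1 d2 tail r : List Char) (len times : Int)
    (stack : List (Int × Int)) (mult total : Int)
    (hd : s.drop i = '(' :: (d1 ++ 'x' :: d2 ++ ')' :: (tail ++ r)))
    (h1 : ∀ c ∈ d1, c.isDigit) (h2 : ∀ c ∈ d2, c.isDigit)
    (hL : PySem.Int.ofChars? d1 = some len) (hT : PySem.Int.ofChars? d2 = some times)
    (h0 : 0 ≤ len) (hlen : len.toNat ≤ tail.length)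
    (hst : ∀ p ∈ stack, (i : Int) < p.1) :
    bGo s i stack mult total = bGo s (i + d1.length + d2.length + 3)
      ((((i + d1.length + d2.length + 3 + len.toNat : Nat) : Int), mult) :: stack)
      (mult * times) total := by
  have hi : i < s.length := by
    by_contra hx
    rw [List.drop_eq_nil_of_le (by omega)] at hd
    simp at hd
  have hgi : s[i] = '(' := pv_getElem_drop' s i hi _ _ hd
  have hfind := pv_findFrom_marker s i d1 d2 tail r hd h1 h2
  have hx1 : 'x' ∉ d1 := pv_not_mem_digits d1 h1 'x' (by decide)
  have hx2 : 'x' ∉ d2 := pv_not_mem_digits d2 h2 'x' (by decide)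
  conv_lhs => rw [bGo.eq_def]
  rw [dif_pos hi, if_pos hgi, hfind, dif_neg (by omega)]
  rw [pv_slice_content s i d1 d2 tail r hd, pv_split_digits d1 d2 hx1 hx2]
  simp only [hL, hT]
  rw [pv_bPop_noop i stack mult hst]
  rw [show (((i + d1.length + d2.length + 2 : Nat) : Int) + 1).toNat
      = i + d1.length + d2.length + 3 from by omega]
  rw [dif_pos (by omega)]
  rw [show (((i + d1.length + d2.length + 2 : Nat) : Int) + 1 + len)
      = ((i + d1.length + d2.length + 3 + len.toNat : Nat) : Int) from by omega]

-- region decomposition for B's loop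
theorem pv_lb : ∀ (n : Nat) (t : List Char), t.length ≤ n → wfGo t = true →
    ∀ (s : List Char) (i : Nat) (stack : List (Int × Int)) (mult total : Int) (r : List Char),
      s.drop i = t ++ r → (∀ p ∈ stack, ((i + t.length : Nat) : Int) ≤ p.1) →
      bGo s i stack mult total = bGo s (i + t.length) stack mult (total + mult * aGo t 0 0) := by
  intro n
  induction n with
  | zero =>
    intro t ht _ s i stack mult total r _ _
    have h0 : t = [] := List.length_eq_zero_iff.mp (by omega)
    subst h0
    simp [pv_aGo_nil]
  | succ m ih =>
    intro t ht hwf s i stack mult total r hd hst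
    cases t with
    | nil => simp [pv_aGo_nil]
    | cons c rest =>
      have hlt : ∀ p ∈ stack, (i : Int) < p.1 := by
        intro p hp
        have := hst p hp
        simp at this
        omega
      by_cases hc : c = '('
      · subst hc
        obtain ⟨d1, d2, tail, len, times, hrest, h1, h2, hL, hT, h0, hlen, hwt, hwd⟩ :=
          pv_wf_marker rest hwf
        subst hrest
        have hd' : s.drop i = '(' :: (d1 ++ 'x' :: d2 ++ ')' :: (tail ++ r)) := by
          rw [hd]; simp
        rw [pv_bGo_step s i d1 d2 tail r len times stack mult total hd' h1 h2 hL hT h0 hlen hlt]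
        have htake_len : (tail.take len.toNat).length = len.toNat := by simp; omega
        have hlen_t : (tail.take len.toNat).length ≤ m := by simp at ht ⊢; omega
        have hlen_d : (tail.drop len.toNat).length ≤ m := by simp at ht ⊢; omega
        have hall : s.drop (i + d1.length + d2.length + 3) = tail ++ r := by
          rw [show i + d1.length + d2.length + 3 = i + (d1.length + d2.length + 3) + 0 from by
            ring]
          simpa using pv_drop_region s i d1 d2 tail r 0 hd' (by omega)
        have hdrop3 : s.drop (i + d1.length + d2.length + 3)
            = tail.take len.toNat ++ (tail.drop len.toNat ++ r) := by
          rw [hall]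
          conv_lhs => rw [← List.take_append_drop len.toNat tail]
          rw [List.append_assoc]
        have hbound : ∀ p ∈ ((((i + d1.length + d2.length + 3 + len.toNat : Nat) : Int), mult)
            :: stack),
            ((i + d1.length + d2.length + 3 + (tail.take len.toNat).length : Nat) : Int) ≤ p.1 := by
          intro p hp
          rcases List.mem_cons.mp hp with hp1 | hp2
          · subst hp1; simp [htake_len]
          · have := hst p hp2; simp at this ⊢; omega
        rw [ih (tail.take len.toNat) hlen_t hwt s (i + d1.length + d2.length + 3)
          ((((i + d1.length + d2.length + 3 + len.toNat : Nat) : Int), mult) :: stack)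
          (mult * times) total (tail.drop len.toNat ++ r) hdrop3 hbound]
        rw [htake_len]
        rw [pv_bGo_pop s (i + d1.length + d2.length + 3 + len.toNat) _ mult (mult * times) _
          stack (by omega)]
        have hdropR : s.drop (i + d1.length + d2.length + 3 + len.toNat)
            = tail.drop len.toNat ++ r := by
          rw [show i + d1.length + d2.length + 3 + len.toNat
              = i + (d1.length + d2.length + 3) + len.toNat from by ring]
          exact pv_drop_region s i d1 d2 tail r len.toNat hd' hlen
        have hbound2 : ∀ p ∈ stack,
            ((i + d1.length + d2.length + 3 + len.toNat + (tail.drop len.toNat).length : Nat)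
              : Int) ≤ p.1 := by
          intro p hp
          have := hst p hp
          simp at this ⊢
          omega
        rw [ih (tail.drop len.toNat) hlen_d hwd s (i + d1.length + d2.length + 3 + len.toNat)
          stack mult _ r hdropR hbound2]
        rw [pv_aVal_marker d1 d2 tail len times h1 h2 hL hT h0 hlen hwd]
        congr 1
        · simp; omega
        · ring
      · have hne : s.drop i = c :: (rest ++ r) := by rw [hd]; simp
        have hi : i < s.length := by
          by_contra hx
          rw [List.drop_eq_nil_of_le (by omega)] at hne
          simp at hne
        have hgi : s[i] = c := pv_getElem_drop' s i hi _ _ hne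
        have hwr : wfGo rest = true := by rw [← pv_wf_lit c rest hc]; exact hwf
        rw [pv_bGo_lit s i stack mult total hi (by rw [hgi]; exact hc) hlt]
        rw [ih rest (by simp at ht; omega) hwr s (i + 1) stack mult (total + mult) r
          (by rw [← pv_drop_add s i 1, hne]; simp)
          (by intro p hp; have := hst p hp; simp at this ⊢; omega)]
        rw [pv_aVal_lit c rest hc hwr]
        congr 1
        · simp; omega
        · ring


-- ===== VERDICT (by name: the statement is the Claim_ definition above) =====
theorem ofCourseThereIsMoreDecompressing_spec : Claim_equal_ofCourseThereIsMoreDecompressing := by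
  intro str _ hpre
  unfold Spec_ofCourseThereIsMoreDecompressing ofCourseThereIsMoreDecompressing ofCourseThereIsMoreDecompressing_alt
  have hpre' : wfGo str.toList = true :=
    pv_wfGoF_bridge str.toList.length str.toList Nat.le.refl (str.toList.length + 1)
      (by omega) hpre
  rw [pv_aGoF_bridge _ _ _ _ (by omega), pv_bGoF_bridge _ _ _ _ _ _ (by omega)]
  have h := pv_lb (str.toList.length) str.toList Nat.le.refl hpre' str.toList 0 [] 1 0 [] (by simp) (by simp)
  rw [h, pv_bGo_term _ _ _ _ _ (by simp)]
  ring
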